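-- pv_equiv track=rewrite | github.com/vb64/test.tasks | two_maximums/2max.py | two_max
-- ===== SOURCE A (Python) =====
-- from operator import itemgetter
--
-- def two_max(data):
--     """
--     find 2 biggest maximums in data sequence
--     return tuple (first_max, second_max)
--     each maximum is a tuple (position_in_sequence, maximum_value) or None if maximum absent
--     """
--     if len(data) < 3:
--         raise ValueError("Sequence too short")
--
--     maximums = []
--     is_grow = False
--     prev = data[0]
--
--     for i, j in enumerate(data[1:]):
--         if is_grow:
--             if j < prev:
--                 is_grow = False
--                 maximums.append((i, prev))
--         else:
--             if j > prev:
--                 is_grow = True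
--
--         prev = j
--
--     maximums.sort(key=itemgetter(1), reverse=True)
--     one, two = None, None
--     if maximums:
--         one = maximums[0]
--     if len(maximums) > 1:
--         two = maximums[1]
--
--     return (one, two)
-- ===== SOURCE B (Python) =====
-- def two_max(data):
--     """
--     find 2 biggest maximums in data sequence in a single pass:
--     peaks are detected and the best two kept as we go (no peak list, no sort)
--     """
--     if len(data) < 3:
--         raise ValueError("Sequence too short")
--
--     def push(one, two, peak):
--         # keep the two best peaks; strict '>' preserves the stable tie-break
--         if one is None or peak[1] > one[1]:
--             return peak, one
--         if two is None or peak[1] > two[1]: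
--             return one, peak
--         return one, two
--
--     one, two = None, None
--     is_grow = False
--     for i, (a, b) in enumerate(zip(data, data[1:])):
--         if is_grow:
--             if b < a:
--                 is_grow = False
--                 one, two = push(one, two, (i, a))
--         elif b > a:
--             is_grow = True
--
--     return (one, two)
-- ===== Notes on version B (the rewrite author's own statement) =====
-- stated objective: alternative
-- what changed: B replaces A's collect-all-peaks-then-stable-sort-descending with a single pass that detects peaks and keeps only the current best two via strict-greater replacement (which reproduces the stable sort's tie-break), so no peak list and no sort are built; it trades A's sort for constant extra state per element.
import Mathlib
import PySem

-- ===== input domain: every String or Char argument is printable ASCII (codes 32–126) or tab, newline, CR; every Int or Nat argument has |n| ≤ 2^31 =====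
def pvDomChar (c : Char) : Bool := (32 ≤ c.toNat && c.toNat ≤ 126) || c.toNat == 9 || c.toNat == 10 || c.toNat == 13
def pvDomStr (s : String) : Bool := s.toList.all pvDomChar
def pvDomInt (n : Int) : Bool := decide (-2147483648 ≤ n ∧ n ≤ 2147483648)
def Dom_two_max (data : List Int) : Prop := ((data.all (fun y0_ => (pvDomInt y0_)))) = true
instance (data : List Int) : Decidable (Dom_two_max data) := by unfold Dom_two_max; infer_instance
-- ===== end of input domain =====

-- B replaces A's peak-list + stable descending sort with a single pass that keeps only the best two peaks (alternative algorithm; no peak list, no sort).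


-- ===== PORT A =====
-- 'for i, j in enumerate(data[1:])': structural recursion over the tail with the
-- enumerate counter i, the is_grow flag, prev, and the 'maximums' accumulator.
def twoMaxLoopA : List Int → Int → Bool → Int → List (Int × Int) → List (Int × Int)
  | [], _, _, _, acc => acc
  | j :: rest, i, grow, prev, acc =>
    if grow then
      if j < prev then twoMaxLoopA rest (i + 1) false j (acc ++ [(i, prev)])
      else twoMaxLoopA rest (i + 1) grow j acc
    else
      if j > prev then twoMaxLoopA rest (i + 1) true j acc
      else twoMaxLoopA rest (i + 1) grow j acc

-- A raises ValueError for len(data) < 3 (excluded by Pre_); the port returns (none, none) there.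
def two_max (data : List Int) : (Option (Int × Int)) × (Option (Int × Int)) :=
  if data.length < 3 then (none, none)
  else
    match data with
    | [] => (none, none)  -- unreachable under the length guard
    | d0 :: rest =>
      let s := PySem.List.sorted (twoMaxLoopA rest 0 false d0 []) (fun m => m.2) true
      (s[0]?, s[1]?)

-- ===== PORT B =====
-- the 'push' helper of Source B: keep the best two peaks, strict '>' replacement
def twoMaxPush (one two : Option (Int × Int)) (peak : Int × Int) :
    Option (Int × Int) × Option (Int × Int) :=
  match one with
  | none => (some peak, one)
  | some o =>
    if peak.2 > o.2 then (some peak, one)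
    else
      match two with
      | none => (one, some peak)
      | some t => if peak.2 > t.2 then (one, some peak) else (one, two)

-- 'for i, (a, b) in enumerate(zip(data, data[1:]))': recursion over the zipped pairs
def twoMaxLoopB : List (Int × Int) → Int → Bool → Option (Int × Int) → Option (Int × Int) →
    (Option (Int × Int)) × (Option (Int × Int))
  | [], _, _, one, two => (one, two)
  | (a, b) :: rest, i, grow, one, two =>
    if grow then
      if b < a then
        let st := twoMaxPush one two (i, a)
        twoMaxLoopB rest (i + 1) false st.1 st.2
      else twoMaxLoopB rest (i + 1) grow one two
    else
      if b > a then twoMaxLoopB rest (i + 1) true one two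
      else twoMaxLoopB rest (i + 1) grow one two

-- B raises ValueError for len(data) < 3 (excluded by Pre_); the port returns (none, none) there.
def two_max_alt (data : List Int) : (Option (Int × Int)) × (Option (Int × Int)) :=
  if data.length < 3 then (none, none)
  else twoMaxLoopB (data.zip (data.drop 1)) 0 false none none

-- ===== PRECONDITION & SPEC =====
-- Pre_ excludes exactly the inputs with fewer than 3 elements, on which A raises ValueError.
def Pre_two_max (data : List Int) : Prop := 3 ≤ data.length
instance (data : List Int) : Decidable (Pre_two_max data) := by unfold Pre_two_max; infer_instance
def pvWitness_two_max : List Int := [0, 1, 0]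

def Spec_two_max (data : List Int) (out : (Option (Int × Int)) × (Option (Int × Int))) : Prop := out = two_max_alt data
instance (data : List Int) (out : (Option (Int × Int)) × (Option (Int × Int))) : Decidable (Spec_two_max data out) := by unfold Spec_two_max; infer_instance

-- ===== CLAIM (what is proved, stated in full; the proofs are below) =====
def Claim_equal_two_max : Prop := ∀ (data : List Int), Dom_two_max data → Pre_two_max data → Spec_two_max data (two_max data)

-- ===== LEMMAS AND PROOFS =====

-- the uncurried push step, as a foldl step over a peak list
def twoMaxPushF (st : Option (Int × Int) × Option (Int × Int)) (p : Int × Int) :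
    Option (Int × Int) × Option (Int × Int) :=
  twoMaxPush st.1 st.2 p

-- pushing one peak tracks the first two elements of one insertion step of A's reverse sort
theorem push_insertBy (s : List (Int × Int)) (p : Int × Int) :
    twoMaxPush s[0]? s[1]? p =
      ((PySem.List.insertBy (fun a b => decide (b.2 < a.2)) p s)[0]?,
       (PySem.List.insertBy (fun a b => decide (b.2 < a.2)) p s)[1]?) := by
  match s with
  | [] => simp [twoMaxPush, PySem.List.insertBy]
  | [a] =>
    simp only [twoMaxPush, PySem.List.insertBy]
    split_ifs with h1 h2 <;> simp_all
  | a :: c :: t =>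
    by_cases h1 : a.2 < p.2
    · simp [twoMaxPush, PySem.List.insertBy, h1, show p.2 > a.2 from h1]
    · by_cases h2 : c.2 < p.2
      · simp [twoMaxPush, PySem.List.insertBy, h1, h2, show ¬ p.2 > a.2 from h1,
              show p.2 > c.2 from h2]
      · simp [twoMaxPush, PySem.List.insertBy, h1, h2]

-- folding push over peaks tracks the first two elements of A's insertion sort
theorem foldl_push_insertBy (ps : List (Int × Int)) (s : List (Int × Int)) :
    ps.foldl twoMaxPushF (s[0]?, s[1]?) =
      ((ps.foldl (fun acc x => PySem.List.insertBy (fun a b => decide (b.2 < a.2)) x acc) s)[0]?,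
       (ps.foldl (fun acc x => PySem.List.insertBy (fun a b => decide (b.2 < a.2)) x acc) s)[1]?) := by
  induction ps generalizing s with
  | nil => simp
  | cons p ps ih =>
    simp only [List.foldl_cons, twoMaxPushF]
    rw [push_insertBy, ih]

-- B's merged loop equals folding push over the peak list that A's loop produces
theorem loopB_eq_loopA (rest : List Int) (p i : Int) (grow : Bool) (acc : List (Int × Int)) :
    twoMaxLoopB (List.zip (p :: rest) rest) i grow
        (acc.foldl twoMaxPushF (none, none)).1 (acc.foldl twoMaxPushF (none, none)).2 =
      (twoMaxLoopA rest i grow p acc).foldl twoMaxPushF (none, none) := by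
  induction rest generalizing p i grow acc with
  | nil => simp [twoMaxLoopB, twoMaxLoopA]
  | cons b rest ih =>
    show twoMaxLoopB ((p, b) :: List.zip (b :: rest) rest) i grow _ _ = _
    simp only [twoMaxLoopA, twoMaxLoopB]
    split_ifs with h1 h2 h3
    · have hst : twoMaxPush (acc.foldl twoMaxPushF (none, none)).1
          (acc.foldl twoMaxPushF (none, none)).2 (i, p) =
          (acc ++ [(i, p)]).foldl twoMaxPushF (none, none) := by
        simp [List.foldl_append, twoMaxPushF]
      rw [hst, ih]
    · exact ih b (i + 1) grow acc
    · exact ih b (i + 1) true acc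
    · exact ih b (i + 1) grow acc

-- ===== VERDICT (by name: the statement is the Claim_ definition above) =====
theorem two_max_spec : Claim_equal_two_max := by
  intro data _ hpre
  unfold Spec_two_max two_max two_max_alt
  have hlen : ¬ data.length < 3 := by
    unfold Pre_two_max at hpre; omega
  match data with
  | [] => simp at hlen
  | d0 :: rest =>
    simp only [if_neg hlen]
    rw [show (List.drop 1 (d0 :: rest)) = rest from rfl]
    rw [PySem.List.sorted_rev_eq_foldl_insertBy]
    have h1 := loopB_eq_loopA rest d0 0 false []
    simp only [List.foldl_nil] at h1
    rw [h1]
    have h2 := foldl_push_insertBy (twoMaxLoopA rest 0 false d0 []) []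
    simpa using h2.symm
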